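-- pv_equiv track=rewrite | github.com/IamWilliamWang/Leetcode-practice | test_script.py | getCircles
-- ===== SOURCE A (Python) =====
-- from typing import Iterator, Dict, List, Tuple
--
-- def getCircles(matrix: List[List[int]], startNode: int):
--     """
--     获得所有环的路径
--     :param matrix: 邻接矩阵
--     :param startNode: 从哪个点开始DFS
--     :return:
--     """
--
--     def findCycle(v):
--         if v in trace:
--             yield trace[trace.index(v):]
--             return
--         trace.append(v)
--         for i in range(len(matrix)):
--             if matrix[v][i] != 0:
--                 yield from findCycle(i)
--         trace.pop()
--
--     trace = []
--     yield from findCycle(startNode)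
-- ===== SOURCE B (Python) =====
-- def getCircles(matrix, startNode):
--     """
--     获得所有环的路径 — same cycle paths in the same order, but: adjacency lists are
--     precomputed once (no per-visit scan over all columns), and the DFS is a pure
--     recursive function over an immutable path instead of a generator mutating a
--     shared trace.  Returns a list (the caller of A materialises the generator).
--     """
--     if not matrix:
--         return []
--     neighbors = [[i for i, x in enumerate(row) if x != 0] for row in matrix]
--
--     def dfs(path, v):
--         if v in path:
--             return [path[path.index(v):]]
--         path = path + [v]
--         out = []
--         for w in neighbors[v]:
--             out += dfs(path, w)
--         return out
--
--     return dfs([], startNode)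
-- ===== Notes on version B (the rewrite author's own statement) =====
-- stated objective: alternative
-- what changed: The mutable-trace recursive generator is replaced by a pure recursive function over an immutable path, with per-node adjacency lists precomputed once so the per-visit scan over all n columns disappears.
-- outside the precondition, e.g. on getCircles([[0, 1, 1], [1, 0]], 0): A returns [[0, 1]], B raises IndexError
import Mathlib
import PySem

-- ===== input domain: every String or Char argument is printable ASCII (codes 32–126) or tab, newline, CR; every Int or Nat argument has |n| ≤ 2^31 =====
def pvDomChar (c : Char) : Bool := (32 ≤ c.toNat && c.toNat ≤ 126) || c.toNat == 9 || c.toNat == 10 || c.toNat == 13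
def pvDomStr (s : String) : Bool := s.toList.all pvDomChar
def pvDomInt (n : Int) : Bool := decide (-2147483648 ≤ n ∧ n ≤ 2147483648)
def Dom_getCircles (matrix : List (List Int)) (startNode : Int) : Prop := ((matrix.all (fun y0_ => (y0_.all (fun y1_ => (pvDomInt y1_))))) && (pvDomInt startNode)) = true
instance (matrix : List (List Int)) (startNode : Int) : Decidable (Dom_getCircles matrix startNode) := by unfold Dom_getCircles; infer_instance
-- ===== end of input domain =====

-- B replaces A's mutable-trace generator by a pure recursive DFS over an immutable path with
-- adjacency lists precomputed once; A is a generator, equivalence is about the materialised list.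

-- ===== PORT A =====
-- A's recursion depth is bounded by one more than the number of distinct nodes ever in `trace`
-- (`trace` stays duplicate-free), so fuel `matrix.length + 2` is never exhausted; the 0-branch is dead.
def findCycleA (matrix : List (List Int)) : Nat → List Int → Int → List (List Int)
  | fuel, trace, v =>
    match PySem.List.index? trace v with
    | some k => [trace.drop k]                 -- yield trace[trace.index(v):]
    | none =>
      match fuel with
      | 0 => []
      | fuel + 1 =>
        -- trace.append(v); for i in range(len(matrix)): if matrix[v][i] != 0: yield from findCycle(i); trace.pop()
        (PySem.List.pyRange 0 (matrix.length : Int) 1).foldl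
          (fun acc i =>
            if PySem.List.pyGetD (PySem.List.pyGetD matrix v []) i 0 ≠ 0 then
              acc ++ findCycleA matrix fuel (trace ++ [v]) i
            else acc) []

def getCircles (matrix : List (List Int)) (startNode : Int) : List (List Int) :=
  findCycleA matrix (matrix.length + 2) [] startNode

-- ===== PORT B =====
-- neighbors row = [i for i, x in enumerate(row) if x != 0]
def nbrsOf (row : List Int) : List Int :=
  (PySem.List.enumerate row).filterMap (fun p => if p.2 ≠ 0 then some p.1 else none)

def dfsB (neighbors : List (List Int)) : Nat → List Int → Int → List (List Int)
  | fuel, path, v =>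
    match PySem.List.index? path v with
    | some k => [path.drop k]                  -- return [path[path.index(v):]]
    | none =>
      match fuel with
      | 0 => []
      | fuel + 1 =>
        (PySem.List.pyGetD neighbors v []).foldl
          (fun out w => out ++ dfsB neighbors fuel (path ++ [v]) w) []

def getCircles_alt (matrix : List (List Int)) (startNode : Int) : List (List Int) :=
  if matrix = [] then []
  else dfsB (matrix.map nbrsOf) (matrix.length + 2) [] startNode

-- ===== PRECONDITION & SPEC =====
-- Pre_ restricts to square matrices (the natural domain of an adjacency matrix; on ragged input A
-- raises IndexError on any visited short row and silently ignores the tail of a long row) and to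
-- start nodes that index a row (outside, A raises IndexError unless the matrix is empty).
def Pre_getCircles (matrix : List (List Int)) (startNode : Int) : Prop :=
  (∀ row ∈ matrix, row.length = matrix.length) ∧
  (matrix = [] ∨ (-(matrix.length : Int) ≤ startNode ∧ startNode < (matrix.length : Int)))

instance (matrix : List (List Int)) (startNode : Int) : Decidable (Pre_getCircles matrix startNode) := by
  unfold Pre_getCircles; infer_instance

def pvWitness_getCircles : List (List Int) × Int := ([[0, 1], [1, 0]], 0)

def Spec_getCircles (matrix : List (List Int)) (startNode : Int) (out : List (List Int)) : Prop := out = getCircles_alt matrix startNode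
instance (matrix : List (List Int)) (startNode : Int) (out : List (List Int)) : Decidable (Spec_getCircles matrix startNode out) := by unfold Spec_getCircles; infer_instance

-- ===== CLAIM (what is proved, stated in full; the proofs are below) =====
def Claim_equal_getCircles : Prop := ∀ (matrix : List (List Int)) (startNode : Int), Dom_getCircles matrix startNode → Pre_getCircles matrix startNode → Spec_getCircles matrix startNode (getCircles matrix startNode)

-- ===== LEMMAS AND PROOFS =====

-- 'out += g(x)' guarded by an if: the loop is the flatMap of the filtered list.
theorem foldl_append_ite_list {α β : Type} (p : α → Prop) [DecidablePred p]
    (g : α → List β) (l : List α) (acc : List β) :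
    l.foldl (fun acc x => if p x then acc ++ g x else acc) acc
      = acc ++ (l.filter (fun x => decide (p x))).flatMap g := by
  induction l generalizing acc with
  | nil => simp
  | cons x xs ih =>
    by_cases h : p x <;> simp [h, ih, List.append_assoc]

theorem filterMap_ite_eq_filter {α : Type} (p : α → Prop) [DecidablePred p] (l : List α) :
    l.filterMap (fun x => if p x then some x else none)
      = l.filter (fun x => decide (p x)) := by
  induction l with
  | nil => rfl
  | cons x xs ih => by_cases h : p x <;> simp [h, ih]

-- B's precomputed neighbour list of a row is exactly the set of columns A's scan descends into.
theorem nbrsOf_eq_filter (row : List Int) :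
    nbrsOf row
      = (PySem.List.pyRange 0 (row.length : Int) 1).filter
          (fun i => decide (PySem.List.pyGetD row i 0 ≠ 0)) := by
  unfold nbrsOf
  rw [PySem.List.enumerate_eq_map_pyRange row 0, List.filterMap_map]
  rw [show ((fun p : Int × Int => if p.2 ≠ 0 then some p.1 else none) ∘
        fun j => (j, PySem.List.pyGetD row j 0))
      = fun j : Int => if PySem.List.pyGetD row j 0 ≠ 0 then some j else none from rfl]
  rw [show (fun j : Int => if PySem.List.pyGetD row j 0 ≠ 0 then some j else none)
      = fun j : Int => if (fun i => PySem.List.pyGetD row i 0 ≠ 0) j then some j else none from rfl]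
  exact filterMap_ite_eq_filter _ _

theorem flatMap_congr_mem {α β : Type} {f g : α → List β} (l : List α)
    (h : ∀ x ∈ l, f x = g x) : l.flatMap f = l.flatMap g := by
  induction l with
  | nil => rfl
  | cons x xs ih =>
    simp only [List.flatMap_cons, h x (List.mem_cons_self), ih (fun y hy => h y (List.mem_cons_of_mem _ hy))]

theorem pyGetD_map_inrange {α β : Type} (f : α → β) (xs : List α) (i : Int) (d : β) (d' : α)
    (hlo : -(xs.length : Int) ≤ i) (hhi : i < (xs.length : Int)) :
    PySem.List.pyGetD (xs.map f) i d = f (PySem.List.pyGetD xs i d') := by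
  by_cases hpos : 0 ≤ i
  · rw [PySem.List.pyGetD_eq_getElem (xs.map f) d hpos (by simpa using hhi),
        PySem.List.pyGetD_eq_getElem xs d' hpos hhi]
    simp [List.getElem_map]
  · have hk : i = -(((-i).toNat : Int)) := by omega
    rw [hk, PySem.List.pyGetD_neg_natCast (xs.map f) _ d (by omega) (by simp; omega),
        PySem.List.pyGetD_neg_natCast xs _ d' (by omega) (by omega)]
    simp [List.getElem_map]


-- Main simulation: on a square matrix, A's scan-and-recurse equals B's fold over the
-- precomputed neighbour lists, for any fuel, path and in-range node.
theorem findA_eq_dfsB (matrix : List (List Int))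
    (hsq : ∀ row ∈ matrix, row.length = matrix.length) :
    ∀ (fuel : Nat) (trace : List Int) (v : Int),
      -(matrix.length : Int) ≤ v → v < (matrix.length : Int) →
      findCycleA matrix fuel trace v = dfsB (matrix.map nbrsOf) fuel trace v := by
  intro fuel
  induction fuel with
  | zero =>
    intro trace v _ _
    rw [findCycleA, dfsB]
  | succ fuel ih =>
    intro trace v hlo hhi
    rw [findCycleA, dfsB]
    cases hidx : PySem.List.index? trace v with
    | some k => rfl
    | none =>
      have hrow : PySem.List.pyGetD matrix v [] ∈ matrix :=
        PySem.List.pyGetD_mem matrix [] ⟨hlo, hhi⟩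
      have hlen : (PySem.List.pyGetD matrix v []).length = matrix.length := hsq _ hrow
      rw [pyGetD_map_inrange nbrsOf matrix v [] [] hlo hhi]
      rw [foldl_append_ite_list (fun i => PySem.List.pyGetD (PySem.List.pyGetD matrix v []) i 0 ≠ 0)]
      rw [PySem.List.foldl_append_eq_flatMap]
      rw [nbrsOf_eq_filter, hlen]
      simp only [List.nil_append]
      apply flatMap_congr_mem
      intro i hi
      have hmem := List.mem_filter.1 hi
      have hrange := (PySem.List.mem_pyRange_one).1 hmem.1
      exact ih (trace ++ [v]) i (by omega) (by omega)

-- ===== VERDICT (by name: the statement is the Claim_ definition above) =====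
theorem getCircles_spec : Claim_equal_getCircles := by
  intro matrix startNode _ hpre
  unfold Spec_getCircles getCircles getCircles_alt
  rcases hpre with ⟨hsq, hcase⟩
  rcases hcase with hnil | ⟨hlo, hhi⟩
  · subst hnil
    simp [findCycleA, PySem.List.pyRange_one_eq_nil]
  · have hne : matrix ≠ [] := by
      intro h; subst h; simp only [List.length_nil, Nat.cast_zero] at hlo hhi; omega
    rw [if_neg hne]
    exact findA_eq_dfsB matrix hsq (matrix.length + 2) [] startNode hlo hhi
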